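-- pv_equiv track=rewrite | github.com/dmnth/hackerrank | algos/drawing_book/drawing_book.py | count_pages_from_first
-- ===== SOURCE A (Python) =====
-- def count_pages_from_first(num):
-- 	counter = 0
-- 	while counter != num:
-- 		counter += 1
--
-- 	if num % 2 == 0:
-- 		return counter // 2
-- 	else:
-- 		return (counter-1) // 2
-- ===== SOURCE B (Python) =====
-- def count_pages_from_first(num):
--     return num // 2
-- ===== Notes on version B (the rewrite author's own statement) =====
-- stated objective: faster
-- what changed: Replaced the O(num) counting loop plus parity branch with the closed form num // 2.
import Mathlib
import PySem

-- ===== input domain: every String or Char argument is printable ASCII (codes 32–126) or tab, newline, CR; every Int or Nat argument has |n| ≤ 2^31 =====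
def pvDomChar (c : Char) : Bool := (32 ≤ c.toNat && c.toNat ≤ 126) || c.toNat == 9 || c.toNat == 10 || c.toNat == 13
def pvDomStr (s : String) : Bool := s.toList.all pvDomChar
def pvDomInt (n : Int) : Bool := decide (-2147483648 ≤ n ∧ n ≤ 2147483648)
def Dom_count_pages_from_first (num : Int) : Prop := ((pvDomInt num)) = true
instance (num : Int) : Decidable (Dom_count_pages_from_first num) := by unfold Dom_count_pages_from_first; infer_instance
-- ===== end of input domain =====

-- B replaces A's O(num) counting loop with the closed form num // 2 (O(1), asymptotically faster);
-- Pre_ excludes negative num, on which A's while-loop never terminates.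


-- ===== PORT A =====
-- 'while counter != num: counter += 1'; the 'counter < num' guard only makes the
-- recursion total (Python diverges when counter overshoots num; such num are outside Pre_).
def pvLoopA (counter num : Int) : Int :=
  if counter = num then counter
  else if counter < num then pvLoopA (counter + 1) num
  else counter
termination_by (num - counter).toNat
decreasing_by omega

def count_pages_from_first (num : Int) : Int :=
  let counter := pvLoopA 0 num
  if PySem.Int.mod num 2 = 0 then PySem.Int.floordiv counter 2
  else PySem.Int.floordiv (counter - 1) 2

-- ===== PORT B =====
def count_pages_from_first_alt (num : Int) : Int := PySem.Int.floordiv num 2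

-- ===== PRECONDITION & SPEC =====
-- Pre_ excludes negative num, on which A's while-loop never terminates (no return value).
def Pre_count_pages_from_first (num : Int) : Prop := 0 ≤ num
instance (num : Int) : Decidable (Pre_count_pages_from_first num) := by unfold Pre_count_pages_from_first; infer_instance
def pvWitness_count_pages_from_first : Int := 7

def Spec_count_pages_from_first (num : Int) (out : Int) : Prop := out = count_pages_from_first_alt num
instance (num : Int) (out : Int) : Decidable (Spec_count_pages_from_first num out) := by unfold Spec_count_pages_from_first; infer_instance

-- ===== CLAIM (what is proved, stated in full; the proofs are below) =====
def Claim_equal_count_pages_from_first : Prop := ∀ (num : Int), Dom_count_pages_from_first num → Pre_count_pages_from_first num → Spec_count_pages_from_first num (count_pages_from_first num)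

-- ===== LEMMAS AND PROOFS =====
theorem pvLoopA_eq_aux (k : Nat) : ∀ (counter num : Int), (num - counter).toNat = k → counter ≤ num → pvLoopA counter num = num := by
  induction k with
  | zero =>
    intro c n hk h
    have hcn : c = n := by omega
    rw [pvLoopA]
    simp [hcn]
  | succ k ih =>
    intro c n hk h
    rw [pvLoopA]
    by_cases he : c = n
    · simp [he]
    · simp [he, show c < n by omega]
      exact ih (c + 1) n (by omega) (by omega)

theorem pvLoopA_eq (counter num : Int) (h : counter ≤ num) : pvLoopA counter num = num :=
  pvLoopA_eq_aux (num - counter).toNat counter num rfl h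

-- ===== VERDICT (by name: the statement is the Claim_ definition above) =====
theorem count_pages_from_first_spec : Claim_equal_count_pages_from_first := by
  intro num _ hpre
  unfold Spec_count_pages_from_first count_pages_from_first count_pages_from_first_alt
  rw [pvLoopA_eq 0 num hpre]
  simp only [PySem.Int.mod_eq_emod_of_pos (b := 2) (by omega),
    PySem.Int.floordiv_eq_ediv_of_pos (b := 2) (by omega)]
  split_ifs with hmod <;> omega
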